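-- pv_equiv track=rewrite | github.com/YU-SUKETAKAHASHI/atcoder | ABC189/D.py | logical
-- ===== SOURCE A (Python) =====
-- def logical(bools, n):
--     if n != 0:
--         b = bools.pop()
--         if b == 'OR':
--             return 2**(n) + logical(bools, n-1)
--         elif b == 'AND':
--             return logical(bools, n-1)
--     else:
--         return 1
-- ===== SOURCE B (Python) =====
-- def logical(bools, n):
--     # Iterative, non-mutating: walk the last n operators from the end,
--     # adding 2**i for each 'OR'; an invalid token yields None.
--     total = 1
--     for i, b in zip(range(n, 0, -1), reversed(bools)):
--         if b == 'OR':
--             total += 2 ** i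
--         elif b != 'AND':
--             return None
--     return total
-- ===== Notes on version B (the rewrite author's own statement) =====
-- stated objective: idiomatic
-- what changed: Replaces the recursive call chain (which adds 2**n on return from each 'OR' frame) by a single non-mutating forward loop over zip(range(n, 0, -1), reversed(bools)) with a running total; A pops n elements off bools while B leaves bools unmodified (return values agree).
-- outside the precondition, e.g. on logical(['XOR'], -1): A returns None, B returns 1
import Mathlib
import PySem

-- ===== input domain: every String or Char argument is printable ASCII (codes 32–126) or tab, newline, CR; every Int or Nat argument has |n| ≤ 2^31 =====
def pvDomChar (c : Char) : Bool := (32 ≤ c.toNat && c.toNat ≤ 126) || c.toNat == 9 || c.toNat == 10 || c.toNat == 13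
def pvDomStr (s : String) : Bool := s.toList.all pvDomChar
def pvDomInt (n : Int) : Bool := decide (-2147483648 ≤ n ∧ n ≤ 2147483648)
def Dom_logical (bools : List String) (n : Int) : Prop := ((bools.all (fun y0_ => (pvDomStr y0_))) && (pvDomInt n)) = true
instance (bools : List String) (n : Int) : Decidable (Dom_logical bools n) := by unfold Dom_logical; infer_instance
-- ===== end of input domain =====

-- B replaces A's recursive call chain by one non-mutating forward loop over zip(range(n,0,-1), reversed(bools))
-- with an accumulator (idiomatic); equivalence is about the RETURN value only: A pops n elements off bools, B leaves bools unmodified.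

-- ===== PORT A =====
-- Recursive, exactly A's shape: pop the last element (getLast?/dropLast; empty pop = IndexError → none),
-- 'OR' adds 2**n to the recursive result, 'AND' recurses, any other token falls off the if-chain → None.
-- Python's 2**(n) is only combined with a returned value when n ≥ 1 (deeper levels otherwise raise), where 2 ^ n.toNat is exact.
def logical (bools : List String) (n : Int) : Option Int :=
  if n ≠ 0 then
    match h : bools.getLast? with
    | none => none
    | some b =>
      if b = "OR" then (logical bools.dropLast (n - 1)).map (fun v => 2 ^ n.toNat + v)
      else if b = "AND" then logical bools.dropLast (n - 1)
      else none
  else some 1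
termination_by bools.length
decreasing_by
  all_goals
    have hne : bools ≠ [] := by intro he; subst he; simp at h
    have : 0 < bools.length := List.length_pos_iff.mpr hne
    simp [List.length_dropLast]; omega

-- ===== PORT B =====
-- Source B's loop 'for i, b in zip(range(n, 0, -1), reversed(bools))' with accumulator total starting at 1;
-- the lazy zip is ported as a counter i counting down from n alongside the reversed list (both exhaust -> return total).
def logicalAltGo (i : Int) (l : List String) (total : Int) : Option Int :=
  if i ≤ 0 then some total
  else
    match l with
    | [] => some total
    | b :: rest =>
      if b = "OR" then logicalAltGo (i - 1) rest (total + 2 ^ i.toNat)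
      else if b = "AND" then logicalAltGo (i - 1) rest total
      else none

def logical_alt (bools : List String) (n : Int) : Option Int :=
  logicalAltGo n bools.reverse 1

-- ===== PRECONDITION & SPEC =====
-- true iff the first non-"AND" token of t exists and is an invalid token (not "OR")
def pvBadHead (t : List String) : Bool :=
  match t.dropWhile (fun s => s == "AND") with
  | [] => false
  | h :: _ => !(h == "OR")

-- Pre_ excludes (a) inputs where A raises: n > 0 with fewer than n all-valid trailing tokens (IndexError from pop)
-- or an "OR" popped before an invalid token (TypeError from 2**n + None); and (b) negative n, which is outside the
-- natural domain (n counts the remaining operations) — there A pops until exhaustion and its occasional None return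
-- on a leading invalid token is an artefact of the fall-through.
def Pre_logical (bools : List String) (n : Int) : Prop :=
  0 ≤ n ∧
  ((n.toNat ≤ bools.length ∧ ∀ s ∈ bools.reverse.take n.toNat, s = "OR" ∨ s = "AND")
   ∨ pvBadHead (bools.reverse.take n.toNat) = true)
instance (bools : List String) (n : Int) : Decidable (Pre_logical bools n) := by unfold Pre_logical; infer_instance

def pvWitness_logical : List String × Int := (["AND", "OR"], 2)

def Spec_logical (bools : List String) (n : Int) (out : Option Int) : Prop := out = logical_alt bools n
instance (bools : List String) (n : Int) (out : Option Int) : Decidable (Spec_logical bools n out) := by unfold Spec_logical; infer_instance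

-- ===== CLAIM (what is proved, stated in full; the proofs are below) =====
def Claim_equal_logical : Prop := ∀ (bools : List String) (n : Int), Dom_logical bools n → Pre_logical bools n → Spec_logical bools n (logical bools n)

-- ===== LEMMAS AND PROOFS =====

-- one-step unfoldings of B's loop
theorem go_pos_or (i : Int) (hi : 0 < i) (rest : List String) (total : Int) :
    logicalAltGo i ("OR" :: rest) total = logicalAltGo (i - 1) rest (total + 2 ^ i.toNat) := by
  rw [logicalAltGo, if_neg (by omega)]
  simp

theorem go_pos_and (i : Int) (hi : 0 < i) (rest : List String) (total : Int) :
    logicalAltGo i ("AND" :: rest) total = logicalAltGo (i - 1) rest total := by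
  rw [logicalAltGo, if_neg (by omega)]
  simp

theorem go_pos_bad (i : Int) (hi : 0 < i) (b : String) (hOR : b ≠ "OR") (hAND : b ≠ "AND")
    (rest : List String) (total : Int) :
    logicalAltGo i (b :: rest) total = none := by
  rw [logicalAltGo, if_neg (by omega)]
  simp [hOR, hAND]

-- accumulator shift for B's loop
theorem logicalAltGo_shift (i : Int) (l : List String) (a c : Int) :
    logicalAltGo i l (a + c) = (logicalAltGo i l a).map (· + c) := by
  induction l generalizing i a with
  | nil => rw [logicalAltGo, logicalAltGo]; split <;> simp
  | cons b rest ih =>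
    by_cases hi : 0 < i
    · by_cases hOR : b = "OR"
      · subst hOR
        rw [go_pos_or i hi, go_pos_or i hi,
          show a + c + 2 ^ i.toNat = (a + 2 ^ i.toNat) + c by ring, ih]
      · by_cases hAND : b = "AND"
        · subst hAND
          rw [go_pos_and i hi, go_pos_and i hi, ih]
        · rw [go_pos_bad i hi b hOR hAND, go_pos_bad i hi b hOR hAND]
          rfl
    · rw [logicalAltGo, logicalAltGo, if_pos (by omega), if_pos (by omega)]
      rfl

theorem reverse_of_getLast (bools : List String) (b : String) (h : bools.getLast? = some b) :
    bools.reverse = b :: bools.dropLast.reverse := by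
  induction bools using List.reverseRecOn with
  | nil => simp at h
  | append_singleton as a _ =>
    simp at h
    simp [h]

theorem toNat_pred (n : Int) (hn : 0 < n) : n.toNat = (n - 1).toNat + 1 := by omega

theorem key (bools : List String) (n : Int) :
    Pre_logical bools n → logical bools n = logical_alt bools n := by
  fun_induction logical bools n with
  | case1 bools n hn h =>
    -- empty pop: Pre is impossible
    intro hpre
    exfalso
    obtain ⟨hn0, hd⟩ := hpre
    have hb : bools = [] := List.getLast?_eq_none_iff.mp h
    subst hb
    have hpos : 0 < n := by omega
    rcases hd with ⟨hlen, _⟩ | hbad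
    · simp at hlen; omega
    · simp [pvBadHead] at hbad
  | case2 bools n hn h ih =>
    -- b = "OR"
    intro hpre
    obtain ⟨hn0, hd⟩ := hpre
    have hpos : 0 < n := by omega
    have hrev := reverse_of_getLast bools _ h
    have ht : bools.reverse.take n.toNat = "OR" :: bools.dropLast.reverse.take (n - 1).toNat := by
      rw [hrev, toNat_pred n hpos, List.take_succ_cons]
    -- Pre forces the all-valid disjunct here
    have hgood : n.toNat ≤ bools.length ∧ ∀ s ∈ bools.reverse.take n.toNat, s = "OR" ∨ s = "AND" := by
      rcases hd with hd | hd
      · exact hd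
      · exfalso; rw [ht] at hd; simp [pvBadHead, List.dropWhile] at hd
    have hpre' : Pre_logical bools.dropLast (n - 1) := by
      refine ⟨by omega, Or.inl ⟨?_, ?_⟩⟩
      · have hne : bools ≠ [] := by intro he; subst he; simp at h
        have : 0 < bools.length := List.length_pos_iff.mpr hne
        simp [List.length_dropLast]; omega
      · intro s hs
        exact hgood.2 s (by rw [ht]; exact List.mem_cons_of_mem _ hs)
    rw [ih hpre']
    unfold logical_alt
    rw [hrev, go_pos_or n hpos, logicalAltGo_shift]
    cases logicalAltGo (n - 1) bools.dropLast.reverse 1 <;> simp [Int.add_comm]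
  | case3 bools n hn h hne ih =>
    -- b = "AND"
    intro hpre
    obtain ⟨hn0, hd⟩ := hpre
    have hpos : 0 < n := by omega
    have hrev := reverse_of_getLast bools _ h
    have ht : bools.reverse.take n.toNat = "AND" :: bools.dropLast.reverse.take (n - 1).toNat := by
      rw [hrev, toNat_pred n hpos, List.take_succ_cons]
    have hpre' : Pre_logical bools.dropLast (n - 1) := by
      refine ⟨by omega, ?_⟩
      rcases hd with ⟨hlen, hall⟩ | hbad
      · refine Or.inl ⟨?_, ?_⟩
        · have hne2 : bools ≠ [] := by intro he; subst he; simp at h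
          have : 0 < bools.length := List.length_pos_iff.mpr hne2
          simp [List.length_dropLast]; omega
        · intro s hs
          exact hall s (by rw [ht]; exact List.mem_cons_of_mem _ hs)
      · refine Or.inr ?_
        rw [ht] at hbad
        simpa [pvBadHead, List.dropWhile] using hbad
    rw [ih hpre']
    unfold logical_alt
    rw [hrev, go_pos_and n hpos]
  | case4 bools n hn b h hb hb' =>
    -- invalid token: both None
    intro hpre
    obtain ⟨hn0, -⟩ := hpre
    have hpos : 0 < n := by omega
    unfold logical_alt
    rw [reverse_of_getLast bools b h, go_pos_bad n hpos b hb hb']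
  | case5 bools n hn =>
    intro _
    have : n = 0 := by omega
    subst this
    rw [logical_alt, logicalAltGo.eq_def, if_pos (by omega)]

-- ===== VERDICT (by name: the statement is the Claim_ definition above) =====
theorem logical_spec : Claim_equal_logical := by
  intro bools n _ hpre
  unfold Spec_logical
  exact key bools n hpre
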